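-- pv_equiv track=rewrite | github.com/roshan-eng/iGEM_WebApp | PAM_finder/SearchingAlgorithm.py | CAS_to_PAM
-- ===== SOURCE A (Python) =====
-- def CAS_to_PAM(cas):
--     N = ["A", "T", "G", "C"]
--     R = ["A", "G"]
--     Y = ["C", "T"]
--     W = ["A", "T"]
--     V = ["G", "C", "A"]
--     D = ["A", "T", "G"]
--     PAM = ["ATGC"]
--
--     if cas == "SpCas9":
--         PAM = [n+"GG" for n in N]
--
--     elif cas == "SaCas9":
--         PAM = [n1+"G"+r1+r2+n2 for n1 in N for r1 in R for r2 in R for n2 in N]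
--
--     elif cas == "NmeCas9":
--         PAM = [n1+n2+n3+n4+"GATT" for n1 in N for n2 in N for n3 in N for n4 in N]
--
--     elif cas == "CjCas9":
--         PAM = [n1+n2+n3+n4+r+y+"AC" for n1 in N for n2 in N for n3 in N for n4 in N for r in R for y in Y]
--
--     elif cas == "StCas9":
--         PAM = [n1+n2+"AGAA"+w for n1 in N for n2 in N for w in W]
--
--     elif cas == "LbCpf1" or cas == "AsCpf1":
--         PAM = ["TTT"+v for v in V]
--
--     elif cas == "AaCas12b":
--         PAM = ["TT"+n for n in N]
--
--     elif cas == "BhCas12bv4":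
--         PAM = [d+"TTN" for d in D]
--
--     elif cas == "Cas14":
--         PAM = ["TTTA"]
--
--     PAM = list(set(PAM))
--
--     return PAM
-- ===== SOURCE B (Python) =====
-- from itertools import product
--
-- _BASES = {"N": ["A", "T", "G", "C"], "R": ["A", "G"], "Y": ["C", "T"],
--           "W": ["A", "T"], "V": ["G", "C", "A"], "D": ["A", "T", "G"]}
--
-- # Per-position choice lists; lowercase letters stand for themselves (so
-- # BhCas12bv4's trailing literal N is written as a fixed position).
-- _PATTERNS = {
--     "SpCas9": "Ngg",
--     "SaCas9": "NgRRN",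
--     "NmeCas9": "NNNNgatt",
--     "CjCas9": "NNNNRYac",
--     "StCas9": "NNagaaW",
--     "LbCpf1": "tttV",
--     "AsCpf1": "tttV",
--     "AaCas12b": "ttN",
--     "BhCas12bv4": "Dttn",
--     "Cas14": "ttta",
-- }
--
--
-- def CAS_to_PAM(cas):
--     pat = _PATTERNS.get(cas)
--     if pat is None:
--         return ["ATGC"]
--     choices = [_BASES.get(c, [c.upper()]) for c in pat]
--     return list(set("".join(p) for p in product(*choices)))
-- ===== Notes on version B (the rewrite author's own statement) =====
-- stated objective: simpler
-- what changed: Replaces the nine bespoke nested list-comprehension branches with one table mapping each Cas name to a per-position pattern string, expanded by a single generic product over the ambiguity-code base lists.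
import Mathlib
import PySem

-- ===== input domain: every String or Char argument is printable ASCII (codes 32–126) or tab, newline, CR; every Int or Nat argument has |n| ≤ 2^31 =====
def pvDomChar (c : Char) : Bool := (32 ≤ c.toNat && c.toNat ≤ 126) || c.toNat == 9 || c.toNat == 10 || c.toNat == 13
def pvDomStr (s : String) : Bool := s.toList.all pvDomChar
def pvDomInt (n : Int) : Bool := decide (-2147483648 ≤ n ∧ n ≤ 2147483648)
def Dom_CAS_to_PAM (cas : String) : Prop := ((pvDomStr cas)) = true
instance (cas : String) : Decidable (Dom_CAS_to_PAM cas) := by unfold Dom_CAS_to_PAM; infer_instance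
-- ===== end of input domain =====

-- B replaces A's nine bespoke nested comprehensions by one pattern table expanded with a
-- generic per-position product (objective: simpler). Output compared as a set (A ends with list(set(...))).

-- ===== PORT A =====
def CAS_to_PAM (cas : String) : List String :=
  let N : List String := ["A", "T", "G", "C"]
  let R : List String := ["A", "G"]
  let Y : List String := ["C", "T"]
  let W : List String := ["A", "T"]
  let V : List String := ["G", "C", "A"]
  let D : List String := ["A", "T", "G"]
  let PAM : List String :=
    if cas == "SpCas9" then
      N.map (fun n => n ++ "GG")
    else if cas == "SaCas9" then
      N.flatMap (fun n1 => R.flatMap (fun r1 => R.flatMap (fun r2 => N.map (fun n2 =>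
        n1 ++ "G" ++ r1 ++ r2 ++ n2))))
    else if cas == "NmeCas9" then
      N.flatMap (fun n1 => N.flatMap (fun n2 => N.flatMap (fun n3 => N.map (fun n4 =>
        n1 ++ n2 ++ n3 ++ n4 ++ "GATT"))))
    else if cas == "CjCas9" then
      N.flatMap (fun n1 => N.flatMap (fun n2 => N.flatMap (fun n3 => N.flatMap (fun n4 =>
        R.flatMap (fun r => Y.map (fun y => n1 ++ n2 ++ n3 ++ n4 ++ r ++ y ++ "AC"))))))
    else if cas == "StCas9" then
      N.flatMap (fun n1 => N.flatMap (fun n2 => W.map (fun w => n1 ++ n2 ++ "AGAA" ++ w)))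
    else if cas == "LbCpf1" || cas == "AsCpf1" then
      V.map (fun v => "TTT" ++ v)
    else if cas == "AaCas12b" then
      N.map (fun n => "TT" ++ n)
    else if cas == "BhCas12bv4" then
      D.map (fun d => d ++ "TTN")
    else if cas == "Cas14" then
      ["TTTA"]
    else ["ATGC"]
  PySem.Set.ofList PAM

-- ===== PORT B =====
def pvBases : PySem.Dict Char (List String) :=
  PySem.Dict.ofList [('N', ["A", "T", "G", "C"]), ('R', ["A", "G"]), ('Y', ["C", "T"]),
   ('W', ["A", "T"]), ('V', ["G", "C", "A"]), ('D', ["A", "T", "G"])]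

def pvPatterns : PySem.Dict String String :=
  PySem.Dict.ofList [("SpCas9", "Ngg"), ("SaCas9", "NgRRN"), ("NmeCas9", "NNNNgatt"),
   ("CjCas9", "NNNNRYac"), ("StCas9", "NNagaaW"), ("LbCpf1", "tttV"),
   ("AsCpf1", "tttV"), ("AaCas12b", "ttN"), ("BhCas12bv4", "Dttn"), ("Cas14", "ttta")]

-- itertools.product over the choice lists, tuples as lists, in product order
def pvProduct (choices : List (List String)) : List (List String) :=
  choices.foldl (fun acc ch => acc.flatMap (fun t => ch.map (fun x => t ++ [x]))) [[]]

def CAS_to_PAM_alt (cas : String) : List String :=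
  match PySem.Dict.get? pvPatterns cas with
  | none => ["ATGC"]
  | some pat =>
      let choices := pat.toList.map (fun c =>
        PySem.Dict.getD pvBases c [String.ofList [PySem.Chars.upperChar c]])
      PySem.Set.ofList ((pvProduct choices).map (fun p => PySem.Str.join "" p))

-- ===== PRECONDITION & SPEC =====
def Spec_CAS_to_PAM (cas : String) (out : List String) : Prop := out = CAS_to_PAM_alt cas
instance (cas : String) (out : List String) : Decidable (Spec_CAS_to_PAM cas out) := by unfold Spec_CAS_to_PAM; infer_instance

-- ===== CLAIM (what is proved, stated in full; the proofs are below) =====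
def Claim_equal_CAS_to_PAM : Prop := ∀ (cas : String), Dom_CAS_to_PAM cas → Spec_CAS_to_PAM cas (CAS_to_PAM cas)

-- ===== LEMMAS AND PROOFS =====

-- ===== VERDICT (by name: the statement is the Claim_ definition above) =====
set_option maxRecDepth 40000 in
theorem CAS_to_PAM_spec : Claim_equal_CAS_to_PAM := by
  intro cas _
  unfold Spec_CAS_to_PAM
  by_cases h1 : cas = "SpCas9"; · subst h1; exact congrArg PySem.Set.ofList (by decide)
  by_cases h2 : cas = "SaCas9"; · subst h2; exact congrArg PySem.Set.ofList (by decide)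
  by_cases h3 : cas = "NmeCas9"; · subst h3; exact congrArg PySem.Set.ofList (by decide)
  by_cases h4 : cas = "CjCas9"; · subst h4; exact congrArg PySem.Set.ofList (by decide)
  by_cases h5 : cas = "StCas9"; · subst h5; exact congrArg PySem.Set.ofList (by decide)
  by_cases h6 : cas = "LbCpf1"; · subst h6; exact congrArg PySem.Set.ofList (by decide)
  by_cases h7 : cas = "AsCpf1"; · subst h7; exact congrArg PySem.Set.ofList (by decide)
  by_cases h8 : cas = "AaCas12b"; · subst h8; exact congrArg PySem.Set.ofList (by decide)
  by_cases h9 : cas = "BhCas12bv4"; · subst h9; exact congrArg PySem.Set.ofList (by decide)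
  by_cases h10 : cas = "Cas14"; · subst h10; exact congrArg PySem.Set.ofList (by decide)
  have hget : PySem.Dict.get? pvPatterns cas = none := by
    have hi : pvPatterns.items =
        [("SpCas9", "Ngg"), ("SaCas9", "NgRRN"), ("NmeCas9", "NNNNgatt"),
         ("CjCas9", "NNNNRYac"), ("StCas9", "NNagaaW"), ("LbCpf1", "tttV"),
         ("AsCpf1", "tttV"), ("AaCas12b", "ttN"), ("BhCas12bv4", "Dttn"), ("Cas14", "ttta")] := by
      decide
    simp only [PySem.Dict.get?, hi, Option.map_eq_none_iff, List.find?_eq_none, beq_iff_eq,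
      Prod.forall]
    intro a b hm
    simp only [List.mem_cons, List.not_mem_nil, or_false, Prod.mk.injEq] at hm
    rcases hm with ⟨rfl, _⟩ | ⟨rfl, _⟩ | ⟨rfl, _⟩ | ⟨rfl, _⟩ | ⟨rfl, _⟩ | ⟨rfl, _⟩ | ⟨rfl, _⟩ |
      ⟨rfl, _⟩ | ⟨rfl, _⟩ | ⟨rfl, _⟩ <;>
      first
        | exact Ne.symm h1 | exact Ne.symm h2 | exact Ne.symm h3 | exact Ne.symm h4
        | exact Ne.symm h5 | exact Ne.symm h6 | exact Ne.symm h7 | exact Ne.symm h8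
        | exact Ne.symm h9 | exact Ne.symm h10
  simp [CAS_to_PAM, CAS_to_PAM_alt, hget, h1, h2, h3, h4, h5, h6, h7, h8, h9, h10]
  decide
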